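-- pv_equiv track=rewrite | github.com/codesquad-backend-study/algorithm-study | 모의고사/2020_카카오_인턴십/키패드 누르기.py | bfs
-- ===== SOURCE A (Python) =====
-- import collections
--
-- def bfs(destination, left_num, right_num):
--     dx = [1, -1, 0, 0]
--     dy = [0, 0, 1, -1]
--     dist = [[-1] * 3 for _ in range(4)]
--     destination -= 1
--
--     queue = collections.deque()
--     dist[destination // 3][destination % 3] = 0
--     queue.append((destination % 3, destination // 3))
--     while queue:
--         x, y = queue.popleft()
--         for i in range(4):
--             nx = dx[i] + x
--             ny = dy[i] + y
--             if 0 <= nx < 3 and 0 <= ny < 4: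
--                 if dist[ny][nx] == -1:
--                     dist[ny][nx] = dist[y][x] + 1
--                     queue.append((nx, ny))
--
--     left_num -= 1
--     right_num -= 1
--     return dist[left_num // 3][left_num % 3], dist[right_num // 3][right_num % 3]
-- ===== SOURCE B (Python) =====
-- def bfs(destination, left_num, right_num):
--     row, col = divmod(destination - 1, 3)
--     table = [[abs(r - row) + abs(c - col) for c in range(3)] for r in range(4)]
--
--     def look(n):
--         return table[(n - 1) // 3][(n - 1) % 3]
--
--     return look(left_num), look(right_num)
-- ===== Notes on version B (the rewrite author's own statement) =====
-- stated objective: simpler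
-- what changed: Replaces the BFS flood-fill (deque + incremental distance table) by building the 4x3 distance table directly from the closed-form Manhattan formula (valid because the obstacle-free grid's BFS distance equals Manhattan distance); Pre_ excludes destination <= 0, on which A seeds the BFS through a wrapped negative index while flooding from the unwrapped coordinate and so returns -1 'unvisited' sentinels or distances from the wrong cell.
-- outside the precondition, e.g. on bfs(-11, 2, 2): A returns (-1, -1), B returns (5, 5)
import Mathlib
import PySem

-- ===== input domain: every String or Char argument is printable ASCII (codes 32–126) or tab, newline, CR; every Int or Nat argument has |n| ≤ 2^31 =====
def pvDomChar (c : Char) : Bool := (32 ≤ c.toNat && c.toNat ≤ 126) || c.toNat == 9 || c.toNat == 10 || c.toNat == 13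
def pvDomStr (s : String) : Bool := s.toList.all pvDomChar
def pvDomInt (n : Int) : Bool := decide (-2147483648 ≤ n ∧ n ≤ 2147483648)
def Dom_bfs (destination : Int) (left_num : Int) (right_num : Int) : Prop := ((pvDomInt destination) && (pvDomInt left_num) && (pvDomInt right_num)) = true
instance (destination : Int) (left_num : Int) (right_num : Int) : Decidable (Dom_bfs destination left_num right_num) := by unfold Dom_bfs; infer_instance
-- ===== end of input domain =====

-- B builds the 4x3 distance table directly from the Manhattan formula instead of A's BFS flood-fill (simpler).

-- ===== PORT A =====
-- dist[y][x] read with Python's negative-index wraparound (exact where the index is in wrap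
-- range; Python raises outside, which Pre_ excludes)
def dget2 (dist : List (List Int)) (y x : Int) : Int :=
  PySem.List.pyGetD (PySem.List.pyGetD dist y []) x 0

-- dist[y][x] = v, same wraparound rule
def dset2 (dist : List (List Int)) (y x : Int) (v : Int) : List (List Int) :=
  PySem.List.pySetD dist y (PySem.List.pySetD (PySem.List.pyGetD dist y []) x v)

def bfsDx : List Int := [1, -1, 0, 0]
def bfsDy : List Int := [0, 0, 1, -1]

-- the Python 'for i in range(4)' body, folding (dist, queue-after-popleft)
def bfsVisit (x y : Int) (s : List (List Int) × List (Int × Int)) (i : Int) :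
    List (List Int) × List (Int × Int) :=
  let nx := PySem.List.pyGetD bfsDx i 0 + x
  let ny := PySem.List.pyGetD bfsDy i 0 + y
  if 0 ≤ nx ∧ nx < 3 ∧ 0 ≤ ny ∧ ny < 4 then
    if dget2 s.1 ny nx = -1 then
      (dset2 s.1 ny nx (dget2 s.1 y x + 1), s.2 ++ [(nx, ny)])
    else s
  else s

-- Python's 'while queue'; the fuel only makes the loop total (each enqueue overwrites a fresh
-- -1 cell of the 12-cell table, so at most 13 pops ever happen and fuel 64 is never exhausted)
def bfsLoop : Nat → List (Int × Int) → List (List Int) → List (List Int)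
  | 0, _, dist => dist
  | _ + 1, [], dist => dist
  | fuel + 1, (x, y) :: rest, dist =>
      let s := (PySem.List.pyRange 0 4 1).foldl (bfsVisit x y) (dist, rest)
      bfsLoop fuel s.2 s.1

def bfsTable (destination : Int) : List (List Int) :=
  let dist := (PySem.List.pyRange 0 4 1).map (fun _ => [-1, -1, -1])
  let dest := destination - 1
  let dist := dset2 dist (PySem.Int.floordiv dest 3) (PySem.Int.mod dest 3) 0
  bfsLoop 64 [(PySem.Int.mod dest 3, PySem.Int.floordiv dest 3)] dist

-- the final 'num -= 1; dist[num // 3][num % 3]'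
def lookA (dist : List (List Int)) (num : Int) : Int :=
  let n := num - 1
  dget2 dist (PySem.Int.floordiv n 3) (PySem.Int.mod n 3)

def bfs (destination : Int) (left_num : Int) (right_num : Int) : Int × Int :=
  let dist := bfsTable destination
  (lookA dist left_num, lookA dist right_num)

-- ===== PORT B =====
-- the table comprehension: [[abs(r - row) + abs(c - col) for c in range(3)] for r in range(4)]
def tableB (destination : Int) : List (List Int) :=
  let row := PySem.Int.floordiv (destination - 1) 3
  let col := PySem.Int.mod (destination - 1) 3
  (PySem.List.pyRange 0 4 1).map fun r =>
    (PySem.List.pyRange 0 3 1).map fun c => |r - row| + |c - col|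

-- 'table[(n - 1) // 3][(n - 1) % 3]', Python indexing (wraparound in range; Pre_ keeps it in range)
def lookB (table : List (List Int)) (n : Int) : Int :=
  dget2 table (PySem.Int.floordiv (n - 1) 3) (PySem.Int.mod (n - 1) 3)

def bfs_alt (destination : Int) (left_num : Int) (right_num : Int) : Int × Int :=
  let table := tableB destination
  (lookB table left_num, lookB table right_num)

-- ===== PRECONDITION & SPEC =====
-- Pre_ excludes (i) inputs where A raises IndexError (any of the three numbers outside
-- [-11, 12]) and (ii) destination <= 0, on which A's value is an accident: the BFS seed is
-- written through a wrapped negative index while the flood starts from the unwrapped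
-- coordinate, so A returns -1 'unvisited' sentinels or distances measured from the wrong cell.
def Pre_bfs (destination : Int) (left_num : Int) (right_num : Int) : Prop :=
  1 ≤ destination ∧ destination ≤ 12 ∧ -11 ≤ left_num ∧ left_num ≤ 12 ∧
    -11 ≤ right_num ∧ right_num ≤ 12
instance (destination : Int) (left_num : Int) (right_num : Int) : Decidable (Pre_bfs destination left_num right_num) := by unfold Pre_bfs; infer_instance

def pvWitness_bfs : Int × Int × Int := (1, 4, 12)

def Spec_bfs (destination : Int) (left_num : Int) (right_num : Int) (out : Int × Int) : Prop := out = bfs_alt destination left_num right_num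
instance (destination : Int) (left_num : Int) (right_num : Int) (out : Int × Int) : Decidable (Spec_bfs destination left_num right_num out) := by unfold Spec_bfs; infer_instance

-- ===== CLAIM (what is proved, stated in full; the proofs are below) =====
def Claim_equal_bfs : Prop := ∀ (destination : Int) (left_num : Int) (right_num : Int), Dom_bfs destination left_num right_num → Pre_bfs destination left_num right_num → Spec_bfs destination left_num right_num (bfs destination left_num right_num)

-- ===== LEMMAS AND PROOFS =====
-- exhaustive finite check: for every destination 1..12, A's flooded BFS table equals B's
-- formula-built table (both programs then read it with identical index arithmetic)
def pvCheck : Bool :=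
  (List.range 12).all fun dn => bfsTable ((dn : Int) + 1) == tableB ((dn : Int) + 1)

lemma pvCheck_true : pvCheck = true := by decide

lemma table_eq (d : Int) (hd1 : 1 ≤ d) (hd2 : d ≤ 12) : bfsTable d = tableB d := by
  have hc := pvCheck_true
  unfold pvCheck at hc
  rw [List.all_eq_true] at hc
  have hdcast : ((d - 1).toNat : Int) + 1 = d := by omega
  have h1 := hc (d - 1).toNat (List.mem_range.mpr (by omega))
  rw [hdcast] at h1
  exact beq_iff_eq.mp h1

-- A's final lookup and B's lookup are the same index arithmetic on their tables
lemma look_eq (t : List (List Int)) (n : Int) : lookA t n = lookB t n := rfl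

-- ===== VERDICT (by name: the statement is the Claim_ definition above) =====
theorem bfs_spec : Claim_equal_bfs := by
  unfold Claim_equal_bfs
  intro d l r _ hpre
  unfold Spec_bfs
  show (lookA (bfsTable d) l, lookA (bfsTable d) r) = (lookB (tableB d) l, lookB (tableB d) r)
  rw [table_eq d hpre.1 hpre.2.1, look_eq, look_eq]
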